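-- pv_equiv track=rewrite | github.com/Antoniocalzado02/Entorno101 | CadenasyArrays/ejerc7.py | reemplazarPalabra
-- ===== SOURCE A (Python) =====
-- def reemplazarPalabra(cadena,palabraBuscar,palabraReemplzar):
--     palabra=""
--     palabraPerfecta=""
--
--
--     for i in range(len(cadena)):
--
--         if cadena[i]!=" ":
--             palabra=palabra+cadena[i]
--         else:
--             if palabra==palabraBuscar:
--                 palabraPerfecta=palabraPerfecta+palabraReemplzar + " "
--             elif palabra!=palabraBuscar:
--                 palabraPerfecta=palabraPerfecta+palabra + " "
--             palabra=""
--
--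
--
--
--     return(palabraPerfecta)
-- ===== SOURCE B (Python) =====
-- def reemplazarPalabra(cadena, palabraBuscar, palabraReemplzar):
--     # One pass over words instead of A's per-character scan with manual
--     # word-boundary state.  Only space-terminated words are emitted, which
--     # split(' ')[:-1] expresses directly.
--     resultado = ""
--     for palabra in cadena.split(' ')[:-1]:
--         if palabra == palabraBuscar:
--             resultado += palabraReemplzar + " "
--         else:
--             resultado += palabra + " "
--     return resultado
-- ===== Notes on version B (the rewrite author's own statement) =====
-- stated objective: idiomatic
-- what changed: B tokenizes once with cadena.split(' ') and loops over the space-terminated words (split(' ')[:-1]), instead of A's per-character scan that maintains a partial-word buffer and flushes it at each space.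
import Mathlib
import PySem

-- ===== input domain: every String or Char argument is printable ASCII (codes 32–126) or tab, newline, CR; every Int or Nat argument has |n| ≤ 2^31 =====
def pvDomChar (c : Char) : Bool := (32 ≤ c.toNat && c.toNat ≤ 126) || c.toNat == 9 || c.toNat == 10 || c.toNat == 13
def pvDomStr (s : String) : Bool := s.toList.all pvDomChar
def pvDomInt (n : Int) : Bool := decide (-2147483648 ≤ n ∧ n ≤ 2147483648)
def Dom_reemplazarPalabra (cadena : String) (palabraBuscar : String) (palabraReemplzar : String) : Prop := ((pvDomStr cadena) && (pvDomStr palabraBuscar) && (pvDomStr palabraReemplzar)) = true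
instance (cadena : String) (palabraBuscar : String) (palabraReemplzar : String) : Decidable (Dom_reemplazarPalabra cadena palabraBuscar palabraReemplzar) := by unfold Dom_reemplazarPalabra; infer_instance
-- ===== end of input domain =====

-- B replaces A's per-character scan with manual word-boundary state by a single
-- pass over the words of cadena.split(' ') (idiomatic decomposition; same cost).

-- ===== PORT A =====
-- A's for-loop over cadena's characters, state (palabra, palabraPerfecta).
def pvALoop (buscar reempl : List Char) : List Char → List Char × List Char → List Char × List Char
  | [], st => st
  | ch :: cs, (palabra, perfecta) =>
    if ch ≠ ' ' then
      pvALoop buscar reempl cs (palabra ++ [ch], perfecta)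
    else
      pvALoop buscar reempl cs
        ([], if palabra = buscar then perfecta ++ reempl ++ [' ']
             else perfecta ++ palabra ++ [' '])

def reemplazarPalabra (cadena : String) (palabraBuscar : String) (palabraReemplzar : String) : String :=
  String.mk (pvALoop palabraBuscar.toList palabraReemplzar.toList cadena.toList ([], [])).2

-- ===== PORT B =====
-- Hand port of Python's str.split(' ') for the single-character separator ' ':
-- exact, including empty fields ('' ↦ [''], ' ' ↦ ['', '']).
def pvSplitSp : List Char → List (List Char)
  | [] => [[]]
  | c :: cs =>
    if c = ' ' then [] :: pvSplitSp cs
    else match pvSplitSp cs with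
      | t :: ts => (c :: t) :: ts
      | [] => [[c]]

def reemplazarPalabra_alt (cadena : String) (palabraBuscar : String) (palabraReemplzar : String) : String :=
  String.mk
    (((pvSplitSp cadena.toList).dropLast).foldl
      (fun acc w =>
        acc ++ ((if w = palabraBuscar.toList then palabraReemplzar.toList else w) ++ [' '])) [])

-- ===== PRECONDITION & SPEC =====
def Spec_reemplazarPalabra (cadena : String) (palabraBuscar : String) (palabraReemplzar : String) (out : String) : Prop := out = reemplazarPalabra_alt cadena palabraBuscar palabraReemplzar
instance (cadena : String) (palabraBuscar : String) (palabraReemplzar : String) (out : String) : Decidable (Spec_reemplazarPalabra cadena palabraBuscar palabraReemplzar out) := by unfold Spec_reemplazarPalabra; infer_instance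

-- ===== CLAIM (what is proved, stated in full; the proofs are below) =====
def Claim_equal_reemplazarPalabra : Prop := ∀ (cadena : String) (palabraBuscar : String) (palabraReemplzar : String), Dom_reemplazarPalabra cadena palabraBuscar palabraReemplzar → Spec_reemplazarPalabra cadena palabraBuscar palabraReemplzar (reemplazarPalabra cadena palabraBuscar palabraReemplzar)

-- ===== LEMMAS AND PROOFS =====

theorem pvSplitSp_ne_nil (cs : List Char) : pvSplitSp cs ≠ [] := by
  cases cs with
  | nil => simp [pvSplitSp]
  | cons c cs =>
    simp only [pvSplitSp]
    split
    · simp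
    · cases h : pvSplitSp cs <;> simp

-- the per-word emission both programs perform
def pvEmit (buscar reempl : List Char) (w : List Char) : List Char :=
  (if w = buscar then reempl else w) ++ [' ']

-- prepend the pending partial word to the first split field
def pvConsHead (p : List Char) : List (List Char) → List (List Char)
  | [] => []
  | t :: ts => (p ++ t) :: ts

-- Loop invariant: A's scan with pending word `palabra` and output `acc`
-- produces `acc` followed by the emission of every space-terminated word.
theorem pvALoop_eq (buscar reempl : List Char) (cs : List Char) :
    ∀ (palabra acc : List Char),
      (pvALoop buscar reempl cs (palabra, acc)).2 =
        acc ++ ((pvConsHead palabra (pvSplitSp cs)).dropLast).flatMap (pvEmit buscar reempl) := by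
  induction cs with
  | nil => intro palabra acc; simp [pvALoop, pvSplitSp, pvConsHead]
  | cons c cs ih =>
    intro palabra acc
    by_cases hc : c = ' '
    · subst hc
      rw [show pvALoop buscar reempl (' ' :: cs) (palabra, acc) =
            pvALoop buscar reempl cs
              ([], if palabra = buscar then acc ++ reempl ++ [' '] else acc ++ palabra ++ [' '])
          from by simp [pvALoop]]
      rw [ih, show pvSplitSp (' ' :: cs) = [] :: pvSplitSp cs from by simp [pvSplitSp]]
      obtain ⟨t, ts, hts⟩ := List.exists_cons_of_ne_nil (pvSplitSp_ne_nil cs)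
      rw [hts]
      simp only [pvConsHead, List.nil_append, List.append_nil,
        List.dropLast_cons_of_ne_nil (show (t :: ts) ≠ [] by simp), List.flatMap_cons, pvEmit]
      split <;> simp
    · rw [show pvALoop buscar reempl (c :: cs) (palabra, acc) =
            pvALoop buscar reempl cs (palabra ++ [c], acc) from by simp [pvALoop, hc]]
      rw [ih, show pvSplitSp (c :: cs) = match pvSplitSp cs with
            | t :: ts => (c :: t) :: ts
            | [] => [[c]] from by simp [pvSplitSp, hc]]
      obtain ⟨t, ts, hts⟩ := List.exists_cons_of_ne_nil (pvSplitSp_ne_nil cs)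
      rw [hts]
      simp [pvConsHead]

theorem pvConsHead_nil (ts : List (List Char)) : pvConsHead [] ts = ts := by
  cases ts <;> simp [pvConsHead]

-- ===== VERDICT (by name: the statement is the Claim_ definition above) =====
theorem reemplazarPalabra_spec : Claim_equal_reemplazarPalabra := by
  intro cadena palabraBuscar palabraReemplzar _
  unfold Spec_reemplazarPalabra reemplazarPalabra reemplazarPalabra_alt
  congr 1
  rw [pvALoop_eq, pvConsHead_nil, List.nil_append]
  have h := PySem.List.foldl_append_eq_flatMap
      (g := pvEmit palabraBuscar.toList palabraReemplzar.toList)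
      (l := (pvSplitSp cadena.toList).dropLast) (acc := ([] : List Char))
  simp only [List.nil_append] at h
  exact h.symm
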